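-- pv_equiv track=rewrite | github.com/josejoby/programming_questions | python/matrix_anti_diagonal.py | brute_soln
-- ===== SOURCE A (Python) =====
-- def brute_soln(A):
--     output = []
--     n=len(A)
--     m=len(A[0])
--     for top in range(m+n):
--         temp = []
--         i=0
--         j=top
--         while i<n and j>-1:
--             if j<m:
--                 temp.append(A[i][j])
--             i+=1
--             j-=1
--         while 0<len(temp)<m: # adding placeholder values
--                 temp.append(0)
--         if len(temp)>0:
--             output.append(temp)
--     return output
-- ===== SOURCE B (Python) =====
-- def brute_soln(A):
--     n = len(A)
--     m = len(A[0])
--     if m == 0: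
--         return []
--     buckets = [[] for _ in range(m + n - 1)]
--     for i, row in enumerate(A):
--         for j in range(m):
--             buckets[i + j].append(row[j])
--     return [b + [0] * (m - len(b)) for b in buckets]
-- ===== Notes on version B (the rewrite author's own statement) =====
-- stated objective: faster
-- what changed: B replaces A's diagonal-major gather (for each of the m+n diagonals, walk down all rows testing j<m, then pad in a while loop) by a single row-major scatter pass: each element A[i][j] is appended once to buckets[i+j], and the buckets are padded at the end, so no out-of-range cell is ever visited.
import Mathlib
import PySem

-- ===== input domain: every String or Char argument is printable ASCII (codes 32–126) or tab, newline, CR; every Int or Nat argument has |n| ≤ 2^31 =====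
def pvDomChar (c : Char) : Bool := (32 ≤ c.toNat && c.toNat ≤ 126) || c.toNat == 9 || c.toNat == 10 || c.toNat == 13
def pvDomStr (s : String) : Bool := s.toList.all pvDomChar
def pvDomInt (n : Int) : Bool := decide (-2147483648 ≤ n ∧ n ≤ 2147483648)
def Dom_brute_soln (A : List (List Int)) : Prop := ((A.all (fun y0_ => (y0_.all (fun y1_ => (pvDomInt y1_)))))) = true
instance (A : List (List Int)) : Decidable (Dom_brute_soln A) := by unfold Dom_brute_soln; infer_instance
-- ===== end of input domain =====

-- B replaces A's diagonal-major gather (scan every row for each of the m+n diagonals,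
-- then pad with a while loop) by one row-major scatter pass into buckets[i+j], padded at the end.

-- ===== PORT A =====
-- the inner 'while i<n and j>-1' loop of A
def pvAWhile (A : List (List Int)) (n m : Nat) (i : Nat) (j : Int) (temp : List Int) : List Int :=
  if _h : i < n ∧ j > -1 then
    pvAWhile A n m (i + 1) (j - 1)
      (if j < (m : Int) then temp ++ [PySem.List.pyGetD (PySem.List.pyGetD A (i : Int) []) j 0] else temp)
  else temp
termination_by n - i
decreasing_by omega

-- the 'while 0<len(temp)<m: temp.append(0)' loop of A
def pvAPad (m : Nat) (temp : List Int) : List Int :=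
  if h : 0 < temp.length ∧ temp.length < m then pvAPad m (temp ++ [0]) else temp
termination_by m - temp.length
decreasing_by simp; omega

def brute_soln (A : List (List Int)) : List (List Int) :=
  let n := A.length
  let m := (A.headD []).length   -- len(A[0]); Pre_ excludes the empty matrix
  (List.range (m + n)).foldl (fun output (top : Nat) =>
    let temp := pvAPad m (pvAWhile A n m 0 (top : Int) [])
    if temp.length > 0 then output ++ [temp] else output) []

-- ===== PORT B =====
-- 'for j in range(m): buckets[i+j].append(row[j])'; i+j is always in range of buckets
def pvBInner (m i : Nat) (row : List Int) (bks : List (List Int)) : List (List Int) :=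
  (List.range m).foldl
    (fun b j => b.set (i + j) (b.getD (i + j) [] ++ [PySem.List.pyGetD row (j : Int) 0])) bks

-- 'for i, row in enumerate(A): …'
def pvBRows (m : Nat) : Nat → List (List Int) → List (List Int) → List (List Int)
  | _, [], bks => bks
  | i, r :: rs, bks => pvBRows m (i + 1) rs (pvBInner m i r bks)

def brute_soln_alt (A : List (List Int)) : List (List Int) :=
  let n := A.length
  let m := (A.headD []).length   -- len(A[0]); Pre_ excludes the empty matrix
  if m = 0 then []
  else
    let buckets := pvBRows m 0 A (List.replicate (m + n - 1) [])
    buckets.map (fun b => b ++ List.replicate (m - b.length) 0)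

-- ===== PRECONDITION & SPEC =====
-- Pre_ excludes exactly the inputs where Python A raises an IndexError: the empty matrix
-- (on A[0]) and ragged matrices having a row shorter than the first row (on A[i][j]).
def Pre_brute_soln (A : List (List Int)) : Prop :=
  A ≠ [] ∧ ∀ r ∈ A, (A.headD []).length ≤ r.length
instance (A : List (List Int)) : Decidable (Pre_brute_soln A) := by unfold Pre_brute_soln; infer_instance

def pvWitness_brute_soln : List (List Int) := [[1, 2, 3], [4, 5, 6]]

def Spec_brute_soln (A : List (List Int)) (out : List (List Int)) : Prop := out = brute_soln_alt A
instance (A : List (List Int)) (out : List (List Int)) : Decidable (Spec_brute_soln A out) := by unfold Spec_brute_soln; infer_instance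

-- ===== CLAIM (what is proved, stated in full; the proofs are below) =====
def Claim_equal_brute_soln : Prop := ∀ (A : List (List Int)), Dom_brute_soln A → Pre_brute_soln A → Spec_brute_soln A (brute_soln A)

-- ===== LEMMAS AND PROOFS =====

-- the (unpadded) anti-diagonal d of A, read as an index interval
def pvGather (A : List (List Int)) (n m d : Nat) : List Int :=
  (PySem.List.pyRange (max 0 ((d : Int) - m + 1)) (min (n : Int) ((d : Int) + 1)) 1).map
    (fun x => PySem.List.pyGetD (PySem.List.pyGetD A x []) ((d : Int) - x) 0)

def pvG (A : List (List Int)) (n m d : Nat) : List Int :=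
  pvGather A n m d ++ List.replicate (m - (pvGather A n m d).length) 0

-- A's inner while loop collects exactly the in-range cells of the anti-diagonal through (i, j)
lemma pvAWhile_spec (A : List (List Int)) (n m : Nat) :
    ∀ (k i : Nat) (j : Int) (temp : List Int), n - i ≤ k →
    pvAWhile A n m i j temp =
      temp ++ (PySem.List.pyRange (max (i : Int) ((i : Int) + j - m + 1))
                 (min (n : Int) ((i : Int) + j + 1)) 1).map
        (fun x => PySem.List.pyGetD (PySem.List.pyGetD A x []) (((i : Int) + j) - x) 0) := by
  intro k
  induction k with
  | zero =>
    intro i j temp h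
    rw [pvAWhile, dif_neg (by omega),
      PySem.List.pyRange_one_eq_nil (by omega)]
    simp
  | succ k ih =>
    intro i j temp h
    rw [pvAWhile]
    by_cases hc : i < n ∧ j > -1
    · obtain ⟨h1, h2⟩ := hc
      rw [dif_pos ⟨h1, h2⟩, ih (i + 1) (j - 1) _ (by omega)]
      rw [show ((i + 1 : Nat) : Int) + (j - 1) = (i : Int) + j by push_cast; ring]
      by_cases hj : j < (m : Int)
      · rw [if_pos hj,
          show max (((i + 1 : Nat)) : Int) ((i : Int) + j - m + 1) = (i : Int) + 1 by push_cast; omega,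
          show max (i : Int) ((i : Int) + j - m + 1) = (i : Int) by omega,
          PySem.List.pyRange_one_cons (a := (i : Int)) (b := min (n : Int) ((i : Int) + j + 1)) (by omega)]
        simp only [List.map_cons]
        rw [show (i : Int) + j - (i : Int) = j by ring]
        simp only [List.append_assoc, List.singleton_append]
      · rw [if_neg hj,
          show max (((i + 1 : Nat)) : Int) ((i : Int) + j - m + 1) = (i : Int) + j - m + 1 by push_cast; omega,
          show max (i : Int) ((i : Int) + j - m + 1) = (i : Int) + j - m + 1 by omega]
    · rw [dif_neg hc,
        PySem.List.pyRange_one_eq_nil (by rcases not_and_or.mp hc with h1 | h1 <;> omega)]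
      simp

-- specialised to the start of A's loop (i = 0, j = top)
lemma pvAWhile_run (A : List (List Int)) (n m top : Nat) :
    pvAWhile A n m 0 (top : Int) [] = pvGather A n m top := by
  have h := pvAWhile_spec A n m n 0 (top : Int) [] (by omega)
  simpa [pvGather] using h

-- A's padding loop appends exactly m - len(temp) zeros (on a nonempty temp)
lemma pvAPad_spec (m : Nat) :
    ∀ (k : Nat) (temp : List Int), m - temp.length ≤ k → temp ≠ [] →
    pvAPad m temp = temp ++ List.replicate (m - temp.length) 0 := by
  intro k
  induction k with
  | zero =>
    intro temp h hne
    rw [pvAPad, dif_neg (by omega), show m - temp.length = 0 by omega]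
    simp
  | succ k ih =>
    intro temp h hne
    rw [pvAPad]
    by_cases hc : 0 < temp.length ∧ temp.length < m
    · rw [dif_pos hc, ih (temp ++ [0]) (by simp; omega) (by simp)]
      obtain ⟨h1, h2⟩ := hc
      rw [List.append_assoc]
      congr 1
      rw [show m - temp.length = (m - (temp ++ [0]).length) + 1 by simp; omega,
        List.replicate_succ]
      simp
    · rw [dif_neg hc]
      have h0 : 0 < temp.length := List.length_pos_iff.mpr hne
      have : m - temp.length = 0 := by
        rcases not_and_or.mp hc with h1 | h1 <;> omega
      rw [this]; simp

lemma pvAPad_nil (m : Nat) : pvAPad m [] = [] := by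
  rw [pvAPad]; simp

-- A equals the diagonal-major map of padded gathers
lemma brute_soln_eq_map (A : List (List Int)) (hA : A ≠ []) :
    brute_soln A =
      if (A.headD []).length = 0 then []
      else (List.range ((A.headD []).length + A.length - 1)).map
        (pvG A A.length (A.headD []).length) := by
  simp only [brute_soln]
  by_cases hm : (A.headD []).length = 0
  · rw [hm, if_pos rfl]
    have hstep : ∀ (acc : List (List Int)), ∀ top ∈ List.range (0 + A.length),
        (if (pvAPad 0 (pvAWhile A A.length 0 0 (top : Int) [])).length > 0
          then acc ++ [pvAPad 0 (pvAWhile A A.length 0 0 (top : Int) [])] else acc) = acc := by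
      intro acc top _
      rw [pvAWhile_run]
      rw [show pvGather A A.length 0 top = [] by
        simp only [pvGather]
        rw [PySem.List.pyRange_one_eq_nil (by omega)]; simp]
      simp [pvAPad_nil]
    rw [PySem.List.foldl_congr_mem _ _ _ _ hstep, List.foldl_fixed]
  · rw [if_neg hm]
    set n := A.length with hnd
    set m := (A.headD []).length with hmd
    have hm1 : 1 ≤ m := by omega
    have hn1 : 1 ≤ n := List.length_pos_iff.mpr hA
    rw [show m + n = (m + n - 1) + 1 by omega, List.range_succ, List.foldl_append]
    have hstep : ∀ (acc : List (List Int)), ∀ top ∈ List.range (m + n - 1),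
        (if (pvAPad m (pvAWhile A n m 0 (top : Int) [])).length > 0
          then acc ++ [pvAPad m (pvAWhile A n m 0 (top : Int) [])] else acc)
        = acc ++ [pvG A n m top] := by
      intro acc top htop
      rw [List.mem_range] at htop
      rw [pvAWhile_run]
      have hne : pvGather A n m top ≠ [] := by
        simp only [pvGather]
        rw [PySem.List.pyRange_one_cons (by omega)]
        simp
      rw [pvAPad_spec m m _ (by omega) hne]
      rw [if_pos (by
        simp only [List.length_append, gt_iff_lt]
        have := List.length_pos_iff.mpr hne
        omega)]
      simp only [pvG]
    rw [PySem.List.foldl_congr_mem _ _ _ _ hstep,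
      PySem.List.foldl_append_singleton_eq_map, List.nil_append]
    simp only [List.foldl_cons, List.foldl_nil]
    have hlast : pvAWhile A n m 0 ((m + n - 1 : Nat) : Int) [] = [] := by
      rw [pvAWhile_run]
      simp only [pvGather]
      rw [PySem.List.pyRange_one_eq_nil (by omega)]
      simp
    rw [hlast, pvAPad_nil]
    simp only [List.length_nil, gt_iff_lt, lt_irrefl, if_false]
    congr 2

-- ===== B-side lemmas =====

lemma pvBInner_length (m i : Nat) (row : List Int) (bks : List (List Int)) :
    (pvBInner m i row bks).length = bks.length := by
  simp only [pvBInner]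
  generalize List.range m = l
  induction l generalizing bks with
  | nil => rfl
  | cons j js ih => simp only [List.foldl_cons]; rw [ih, List.length_set]

lemma pvBInner_getD (i : Nat) (row : List Int) :
    ∀ (m : Nat) (bks : List (List Int)) (d : Nat), d < bks.length →
    (pvBInner m i row bks).getD d [] =
      bks.getD d [] ++
        (if i ≤ d ∧ d < i + m then [PySem.List.pyGetD row ((d : Int) - i) 0] else []) := by
  intro m
  induction m with
  | zero =>
    intro bks d hd
    rw [if_neg (by omega)]
    simp [pvBInner]
  | succ m ih =>
    intro bks d hd
    have hstep : pvBInner (m + 1) i row bks =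
        (pvBInner m i row bks).set (i + m)
          ((pvBInner m i row bks).getD (i + m) [] ++ [PySem.List.pyGetD row ((m : Nat) : Int) 0]) := by
      simp only [pvBInner, List.range_succ, List.foldl_append, List.foldl_cons, List.foldl_nil]
    rw [hstep]
    by_cases hde : i + m = d
    · subst hde
      rw [List.getD_eq_getElem?_getD,
        List.getElem?_set_self (by rw [pvBInner_length]; omega)]
      simp only [Option.getD_some]
      rw [ih bks (i + m) hd, if_neg (by omega), if_pos (by omega), List.append_nil,
        show (((i + m : Nat)) : Int) - (i : Int) = ((m : Nat) : Int) by push_cast; ring]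
    · rw [List.getD_eq_getElem?_getD, List.getElem?_set_ne hde,
        ← List.getD_eq_getElem?_getD, ih bks d hd]
      by_cases hc : i ≤ d ∧ d < i + m
      · rw [if_pos hc, if_pos (by omega)]
      · rw [if_neg hc, if_neg (by omega)]

lemma pvBRows_length (m : Nat) :
    ∀ (rows : List (List Int)) (i : Nat) (bks : List (List Int)),
    (pvBRows m i rows bks).length = bks.length := by
  intro rows
  induction rows with
  | nil => intro i bks; rfl
  | cons r rs ih => intro i bks; simp only [pvBRows]; rw [ih, pvBInner_length]

lemma pvBRows_getD (A : List (List Int)) (m : Nat) (hm : 1 ≤ m) :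
    ∀ (k i : Nat) (bks : List (List Int)) (d : Nat), A.length - i ≤ k → d < bks.length →
    (pvBRows m i (A.drop i) bks).getD d [] =
      bks.getD d [] ++
        (PySem.List.pyRange (max (i : Int) ((d : Int) - m + 1)) (min (A.length : Int) ((d : Int) + 1)) 1).map
          (fun x => PySem.List.pyGetD (PySem.List.pyGetD A x []) ((d : Int) - x) 0) := by
  intro k
  induction k with
  | zero =>
    intro i bks d hk hd
    rw [List.drop_eq_nil_of_le (by omega)]
    simp only [pvBRows]
    rw [PySem.List.pyRange_one_eq_nil (by omega)]
    simp
  | succ k ih =>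
    intro i bks d hk hd
    by_cases hi : i < A.length
    · rw [List.drop_eq_getElem_cons hi]
      simp only [pvBRows]
      rw [ih (i + 1) _ d (by omega) (by rw [pvBInner_length]; omega),
        pvBInner_getD i A[i] m bks d hd]
      by_cases hc : i ≤ d ∧ d < i + m
      · rw [if_pos hc, List.append_assoc]
        congr 1
        rw [show max (((i + 1 : Nat)) : Int) ((d : Int) - m + 1) = (i : Int) + 1 by push_cast; omega,
          show max ((i : Int)) ((d : Int) - m + 1) = (i : Int) by omega,
          PySem.List.pyRange_one_cons (a := (i : Int)) (b := min ((A.length : Int)) ((d : Int) + 1)) (by omega)]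
        simp only [List.map_cons]
        rw [PySem.List.pyGetD_natCast A i [], List.getD_eq_getElem A [] hi]
        simp
      · rw [if_neg hc, List.append_nil]
        congr 1
        rcases not_and_or.mp hc with h1 | h1
        · rw [PySem.List.pyRange_one_eq_nil (by omega),
            PySem.List.pyRange_one_eq_nil (by omega)]
        · rw [show max ((i : Int)) ((d : Int) - m + 1) = (d : Int) - m + 1 by omega,
            show max (((i + 1 : Nat)) : Int) ((d : Int) - m + 1) = (d : Int) - m + 1 by push_cast; omega]
    · rw [List.drop_eq_nil_of_le (by omega)]
      simp only [pvBRows]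
      rw [PySem.List.pyRange_one_eq_nil (by omega)]
      simp

-- B's buckets are exactly the gathered diagonals
lemma buckets_eq (A : List (List Int)) (hm : 1 ≤ (A.headD []).length) :
    pvBRows (A.headD []).length 0 A (List.replicate ((A.headD []).length + A.length - 1) []) =
      (List.range ((A.headD []).length + A.length - 1)).map
        (pvGather A A.length (A.headD []).length) := by
  set n := A.length with hnd
  set m := (A.headD []).length with hmd
  set L := m + n - 1 with hLd
  apply List.ext_getElem
  · rw [pvBRows_length, List.length_replicate, List.length_map, List.length_range]
  · intro d hd1 hd2
    rw [pvBRows_length, List.length_replicate] at hd1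
    have h2 := pvBRows_getD A m hm A.length 0 (List.replicate L []) d (by omega)
      (by rw [List.length_replicate]; exact hd1)
    rw [List.drop_zero] at h2
    rw [← List.getD_eq_getElem _ ([] : List Int)
        (by rw [pvBRows_length, List.length_replicate]; exact hd1),
      h2, List.getD_replicate, List.nil_append,
      List.getElem_map, List.getElem_range]
    simp only [pvGather]
    congr 2
    omega

lemma main_eq (A : List (List Int)) (hA : A ≠ []) : brute_soln A = brute_soln_alt A := by
  rw [brute_soln_eq_map A hA]
  simp only [brute_soln_alt]
  by_cases hm : (A.headD []).length = 0
  · rw [if_pos hm, if_pos hm]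
  · rw [if_neg hm, if_neg hm, buckets_eq A (by omega), List.map_map]
    exact List.map_congr_left (fun d _ => rfl)

-- ===== VERDICT (by name: the statement is the Claim_ definition above) =====
theorem brute_soln_spec : Claim_equal_brute_soln := by
  intro A _ hpre
  unfold Spec_brute_soln
  exact main_eq A hpre.1
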